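-- pv_equiv track=rewrite | github.com/Zhiyuan-Wu/apdt | apdt/ml/utils.py | _unzip_list
-- ===== SOURCE A (Python) =====
-- import itertools
--
-- def _unzip_list(nested):
--     '''unzip a list generated by TFModel._zip_run.
--     Example: [[a1,a2,a3],[b1,b2,b3]] -> [[a1,b1],[a_2,b_2],[a3,b_3]]
--     the basic elements should not be empty list [].
--     '''
--     # detect depth
--     depth = 0
--     _temp = nested
--     while 1:
--         if type(_temp) is list:
--             depth = depth + 1
--             _temp = _temp[0]
--         else:
--             break
--
--     # unzip nested
--     if depth==1:
--         nested = [nested]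
--     elif depth>2:
--         for _ in range(depth-2):
--             nested = list(itertools.chain(*nested))
--     nested = list(map(list, zip(*nested)))
--     return nested
-- ===== SOURCE B (Python) =====
-- def _unzip_list(nested):
--     '''unzip a list generated by TFModel._zip_run.
--     Index-based transpose: collect the depth-2 rows recursively, then build
--     each output column by direct indexing up to the shortest row length.'''
--     def collect(x):
--         if type(x) is list and x and type(x[0]) is list:
--             rows = []
--             for c in x:
--                 rows += collect(c)
--             return rows
--         return [x]
--     rows = collect(nested)
--     m = min(len(r) for r in rows)
--     return [[r[i] for r in rows] for i in range(m)]
-- ===== Notes on version B (the rewrite author's own statement) =====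
-- stated objective: alternative
-- what changed: Replaces A's depth-detection loop plus zip(*nested) head/tail transpose by a recursive row collector followed by an index-built transpose up to the shortest row length.
-- crash fix: A raises IndexError in its depth-detection loop when nested is empty or its first row is empty; B returns [] there. — e.g. on _unzip_list([]): A raises IndexError, B returns []
import Mathlib
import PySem

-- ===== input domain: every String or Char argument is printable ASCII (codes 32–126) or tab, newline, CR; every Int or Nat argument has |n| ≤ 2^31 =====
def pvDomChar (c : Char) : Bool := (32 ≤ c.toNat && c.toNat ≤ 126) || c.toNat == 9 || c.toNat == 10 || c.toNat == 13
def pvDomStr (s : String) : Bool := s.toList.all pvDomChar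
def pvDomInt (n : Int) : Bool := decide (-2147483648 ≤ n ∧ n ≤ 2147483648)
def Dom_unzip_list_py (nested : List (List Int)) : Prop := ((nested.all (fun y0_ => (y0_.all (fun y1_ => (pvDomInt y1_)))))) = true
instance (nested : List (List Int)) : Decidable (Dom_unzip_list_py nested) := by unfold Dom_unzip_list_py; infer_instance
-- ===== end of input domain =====

-- B replaces A's zip(*...) transpose by a recursive row collector plus an index-built
-- transpose up to the shortest row length (objective: alternative decomposition;
-- return-value equivalence only).

-- ===== PORT A =====
-- A's depth-detection loop: on the typed domain List (List Int) the loop always finds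
-- depth = 2 (it indexes nested[0] and nested[0][0], raising IndexError when nested or
-- nested[0] is empty — those inputs are excluded by Pre_), so the depth==1 and depth>2
-- branches never fire and A reduces to list(map(list, zip(*nested))).
-- zip(*rows): emit the heads of all rows, then continue on the tails, stopping as soon
-- as some row is exhausted — a literal step-for-step port of zip's semantics.
def pvZipStar (rows : List (List Int)) : List (List Int) :=
  if h : rows ≠ [] ∧ ∀ r ∈ rows, r ≠ [] then
    rows.map List.headI :: pvZipStar (rows.map List.tail)
  else []
termination_by rows.headI.length
decreasing_by
  cases rows with
  | nil => exact absurd rfl h.1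
  | cons a t =>
    have ha : a ≠ [] := h.2 a (List.mem_cons_self)
    simp [List.headI]
    cases a with
    | nil => exact absurd rfl ha
    | cons x xs => simp

def unzip_list_py (nested : List (List Int)) : List (List Int) :=
  pvZipStar nested

-- ===== PORT B =====
-- collect(x): within the type List (List Int), the top call recurses into each child c
-- and every collect(c) returns [c] (c's first element is an int, or c is empty), so the
-- collected rows are nested itself; when nested is empty the guard fails and collect
-- returns [nested] = [[]].
def pvCollect (nested : List (List Int)) : List (List Int) :=
  if nested.isEmpty then [([] : List Int)] else nested.flatMap (fun c => [c])

-- min(len(r) for r in rows)  (rows is always nonempty)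
def pvMinLen (rows : List (List Int)) : Nat :=
  match rows.map List.length with
  | [] => 0
  | h :: t => t.foldl Nat.min h

def unzip_list_py_alt (nested : List (List Int)) : List (List Int) :=
  let rows := pvCollect nested
  let m := pvMinLen rows
  (List.range m).map (fun i => rows.map (fun r => r.getD i 0))

-- ===== PRECONDITION & SPEC =====
-- Pre_ excludes exactly the inputs where A raises IndexError in its depth-detection
-- loop: empty nested (nested[0]) or empty first row (nested[0][0]).
def Pre_unzip_list_py (nested : List (List Int)) : Prop :=
  nested ≠ [] ∧ nested.headI ≠ []
instance (nested : List (List Int)) : Decidable (Pre_unzip_list_py nested) := by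
  unfold Pre_unzip_list_py; infer_instance

def pvWitness_unzip_list_py : List (List Int) := [[1, 2, 3], [4, 5, 6]]

-- A raises IndexError (on nested[0] or nested[0][0]) exactly when nested is empty or its
-- first row is empty; B returns [] there.
def Raises_unzip_list_py (nested : List (List Int)) : Prop :=
  nested = [] ∨ nested.headI = []
instance (nested : List (List Int)) : Decidable (Raises_unzip_list_py nested) := by
  unfold Raises_unzip_list_py; infer_instance
def pvRaiseWitness_unzip_list_py : List (List Int) := []
def pvRaiseWitnessOut_unzip_list_py : List (List Int) := []

def Spec_unzip_list_py (nested : List (List Int)) (out : List (List Int)) : Prop :=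
  out = unzip_list_py_alt nested
instance (nested : List (List Int)) (out : List (List Int)) : Decidable (Spec_unzip_list_py nested out) := by
  unfold Spec_unzip_list_py; infer_instance

-- ===== CLAIM (what is proved, stated in full; the proofs are below) =====
def Claim_equal_unzip_list_py : Prop := ∀ (nested : List (List Int)), Dom_unzip_list_py nested → Pre_unzip_list_py nested → Spec_unzip_list_py nested (unzip_list_py nested)
def Claim_raises_unzip_list_py : Prop := (∀ (nested : List (List Int)), Dom_unzip_list_py nested → Raises_unzip_list_py nested → ¬ Pre_unzip_list_py nested) ∧ (Dom_unzip_list_py (pvRaiseWitness_unzip_list_py) ∧ Raises_unzip_list_py (pvRaiseWitness_unzip_list_py) ∧ unzip_list_py_alt (pvRaiseWitness_unzip_list_py) = pvRaiseWitnessOut_unzip_list_py)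

-- ===== LEMMAS AND PROOFS =====

lemma foldl_min_le (l : List Nat) (b : Nat) : ∀ a ∈ b :: l, l.foldl Nat.min b ≤ a := by
  induction l generalizing b with
  | nil => intro a ha; simp at ha; simp [ha]
  | cons x t ih =>
    intro a ha
    simp only [List.mem_cons] at ha
    rcases ha with h | h | h
    · exact le_trans (ih (Nat.min b x) (Nat.min b x) (by simp)) (by simp [h])
    · exact le_trans (ih (Nat.min b x) (Nat.min b x) (by simp)) (by simp [h])
    · exact ih (Nat.min b x) a (by simp [h])

lemma foldl_min_sub_one (l : List Nat) (b : Nat) :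
    (l.map (· - 1)).foldl Nat.min (b - 1) = l.foldl Nat.min b - 1 := by
  induction l generalizing b with
  | nil => rfl
  | cons x t ih =>
    simp only [List.map_cons, List.foldl_cons]
    rw [show Nat.min (b - 1) (x - 1) = Nat.min b x - 1 from Nat.sub_min_sub_right b x 1]
    exact ih (Nat.min b x)

lemma minLen_tail (rows : List (List Int)) (hne : rows ≠ []) (hall : ∀ r ∈ rows, r ≠ []) :
    pvMinLen (rows.map List.tail) = pvMinLen rows - 1 := by
  cases rows with
  | nil => exact absurd rfl hne
  | cons a t =>
    simp only [pvMinLen, List.map_cons, List.map_map]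
    have : (t.map (List.length ∘ List.tail)) = (t.map List.length).map (· - 1) := by
      simp [List.map_map, Function.comp]
    rw [this]
    have ha : a.tail.length = a.length - 1 := by simp
    rw [ha]
    exact foldl_min_sub_one (t.map List.length) a.length

lemma minLen_pos (rows : List (List Int)) (hall : ∀ r ∈ rows, r ≠ []) :
    ∀ h t, rows = h :: t → 0 < pvMinLen rows := by
  intro h t hrows
  subst hrows
  simp only [pvMinLen, List.map_cons]
  -- every length is positive; the fold stays positive
  have : ∀ (l : List Nat) (b : Nat), 0 < b → (∀ x ∈ l, 0 < x) → 0 < l.foldl Nat.min b := by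
    intro l
    induction l with
    | nil => intro b hb _; exact hb
    | cons x t ih =>
      intro b hb hl
      simp only [List.foldl_cons]
      exact ih (Nat.min b x) (Nat.lt_min.mpr ⟨hb, hl x (by simp)⟩) (fun y hy => hl y (by simp [hy]))
  apply this
  · have := hall h (by simp); cases h with | nil => exact absurd rfl this | cons _ _ => simp
  · intro x hx
    simp only [List.mem_map] at hx
    obtain ⟨r, hr, hxr⟩ := hx
    have := hall r (by simp [hr])
    cases r with | nil => exact absurd rfl this | cons _ _ => simp [← hxr]

lemma minLen_zero_of_empty_mem (rows : List (List Int)) (r : List Int)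
    (hr : r ∈ rows) (hre : r = []) : pvMinLen rows = 0 := by
  cases rows with
  | nil => rfl
  | cons a t =>
    simp only [pvMinLen, List.map_cons]
    have h0 : (0 : Nat) ∈ a.length :: t.map List.length := by
      rcases List.mem_cons.mp hr with h | h
      · have : a.length = 0 := by simp [← h, hre]
        simp [this]
      · exact List.mem_cons_of_mem _ (List.mem_map.mpr ⟨r, h, by simp [hre]⟩)
    have := foldl_min_le (t.map List.length) a.length 0 h0
    omega

-- heads/tails bookkeeping for the index form
lemma getD_zero_eq_headI (r : List Int) (h : r ≠ []) : r.getD 0 0 = r.headI := by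
  cases r with | nil => exact absurd rfl h | cons a t => rfl

-- the main characterisation: zip(*rows) = index transpose up to the min length
lemma getD_succ_tail (r : List Int) (i : Nat) : r.tail.getD i 0 = r.getD (i + 1) 0 := by
  cases r <;> simp

lemma zipStar_eq_index (rows : List (List Int)) :
    pvZipStar rows =
      (List.range (pvMinLen rows)).map (fun i => rows.map (fun r => r.getD i 0)) := by
  induction hn : pvMinLen rows using Nat.strong_induction_on generalizing rows with
  | _ n ih =>
    subst hn
    by_cases h : rows ≠ [] ∧ ∀ r ∈ rows, r ≠ []
    · rw [pvZipStar, dif_pos h]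
      obtain ⟨a, t, rfl⟩ := List.exists_cons_of_ne_nil h.1
      have hpos : 0 < pvMinLen (a :: t) := minLen_pos (a :: t) h.2 a t rfl
      obtain ⟨m, hm'⟩ : ∃ m, pvMinLen (a :: t) = m + 1 :=
        ⟨pvMinLen (a :: t) - 1, by omega⟩
      have htail : pvMinLen ((a :: t).map List.tail) = m := by
        rw [minLen_tail (a :: t) h.1 h.2, hm']; omega
      rw [hm', List.range_succ_eq_map, List.map_cons]
      congr 1
      · exact List.map_congr_left fun r hr => (getD_zero_eq_headI r (h.2 r hr)).symm
      · rw [ih m (by omega) ((a :: t).map List.tail) htail, List.map_map]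
        refine List.map_congr_left fun i _ => ?_
        simp only [Function.comp, List.map_map]
        exact List.map_congr_left fun r _ => getD_succ_tail r i
    · rw [pvZipStar, dif_neg h]
      rcases not_and_or.mp h with hne | hall
      · have : rows = [] := not_not.mp hne
        subst this; simp [pvMinLen]
      · push Not at hall
        obtain ⟨r, hr, hre⟩ := hall
        rw [minLen_zero_of_empty_mem rows r hr hre]
        simp

-- B's collected rows are nested itself when nested is nonempty
lemma collect_eq_self (nested : List (List Int)) (h : nested ≠ []) :
    pvCollect nested = nested := by
  simp [pvCollect, List.isEmpty_eq_false_iff.mpr h, List.flatMap_singleton']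

-- ===== VERDICT (by name: the statement is the Claim_ definition above) =====
theorem unzip_list_py_spec : Claim_equal_unzip_list_py := by
  intro nested _ hpre
  unfold Spec_unzip_list_py unzip_list_py unzip_list_py_alt
  rw [collect_eq_self nested hpre.1]
  exact zipStar_eq_index nested

@[simp] theorem unzip_list_py_raises : Claim_raises_unzip_list_py := by
  unfold Claim_raises_unzip_list_py
  constructor
  · intro nested _ hr hp
    rcases hr with h | h
    · exact hp.1 h
    · exact hp.2 h
  · exact ⟨by decide, by left; rfl, by decide⟩
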